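-- pv_equiv track=rewrite | github.com/CookerArrow5822/School_Exercises | 1st year/Programming 2/product_051.py | get_ranged_digit
-- ===== SOURCE A (Python) =====
-- def get_ranged_digit(value):
--     value_range = "123456789"
--     if value in value_range:
--         return(value)
--
--     while True:
--         numbers = [int(num) for num in value if num != "0"]
--         number = 1
--         for num in numbers:
--             number = number * num
--
--         value = str(number)
--         if value in value_range:
--             return(value)
-- ===== SOURCE B (Python) =====
-- def get_ranged_digit(value):
--     value_range = "123456789"
--     if value in value_range:
--         return value
--     product = 1
--     for ch in value:
--         if ch != "0":
--             product = product * int(ch)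
--     return get_ranged_digit(str(product))
-- ===== Notes on version B (the rewrite author's own statement) =====
-- stated objective: simpler
-- what changed: Replaced the infinite while-loop that builds an intermediate list of digit ints each round by a direct recursion with a single fused product accumulator (no intermediate list, no while True).
import Mathlib
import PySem

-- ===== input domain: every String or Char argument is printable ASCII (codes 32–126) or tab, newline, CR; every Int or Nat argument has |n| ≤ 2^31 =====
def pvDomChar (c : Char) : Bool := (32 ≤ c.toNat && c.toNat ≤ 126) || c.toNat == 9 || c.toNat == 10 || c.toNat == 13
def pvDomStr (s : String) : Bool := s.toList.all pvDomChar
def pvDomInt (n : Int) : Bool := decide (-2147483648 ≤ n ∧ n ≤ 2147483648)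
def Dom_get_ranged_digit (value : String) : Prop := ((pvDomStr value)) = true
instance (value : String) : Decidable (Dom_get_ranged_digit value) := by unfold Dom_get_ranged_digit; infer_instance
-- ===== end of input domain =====

-- B replaces A's while-loop and per-round intermediate digit list by a direct recursion with one fused product accumulator (same cost; objective: simpler).

-- ===== PORT A =====
-- int(str(c)): exact for digit chars; Pre_ restricts every looped-over char to a digit
def pvDigitA (c : Char) : Int := (c.toNat : Int) - 48

-- the 'while True' loop of A; at each loop top value = str(p).  The 'dif' guard only
-- makes the recursion total: under Pre_ the product of the non-zero digits of p is
-- strictly smaller than p whenever the membership test fails, so the fallback is never taken.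
def pvLoopA (p : Int) : String :=
  let value := PySem.Int.toStr p
  if PySem.Str.isIn value "123456789" then value
  else
    let numbers := (value.toList.filter (fun c => c != '0')).map pvDigitA
    let number := numbers.foldl (fun a b => a * b) 1
    if h : number.toNat < p.toNat then pvLoopA number
    else PySem.Int.toStr number
termination_by p.toNat
decreasing_by exact h

def get_ranged_digit (value : String) : String :=
  let value_range := "123456789"
  if PySem.Str.isIn value value_range then value
  else
    let numbers := (value.toList.filter (fun c => c != '0')).map pvDigitA
    let number := numbers.foldl (fun a b => a * b) 1
    pvLoopA number

-- ===== PORT B =====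
-- the 'for ch in value: if ch != "0": product *= int(ch)' accumulator loop of B
def pvProdB (cs : List Char) (product : Int) : Int :=
  match cs with
  | [] => product
  | ch :: rest => pvProdB rest (if ch != '0' then product * ((ch.toNat : Int) - 48) else product)

-- B's recursive call always receives str(product); pvRecB is that recursion on the
-- integer, with the same totality guard as pvLoopA (never taken under Pre_).
def pvRecB (p : Int) : String :=
  let value := PySem.Int.toStr p
  if PySem.Str.isIn value "123456789" then value
  else
    let product := pvProdB value.toList 1
    if h : product.toNat < p.toNat then pvRecB product
    else PySem.Int.toStr product
termination_by p.toNat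
decreasing_by exact h

def get_ranged_digit_alt (value : String) : String :=
  if PySem.Str.isIn value "123456789" then value
  else pvRecB (pvProdB value.toList 1)

-- ===== PRECONDITION & SPEC =====
-- Pre_ excludes exactly the inputs where A raises ValueError: a value that is not a
-- substring of "123456789" and contains a non-digit character (int(ch) raises there).
def Pre_get_ranged_digit (value : String) : Prop :=
  PySem.Str.isIn value "123456789" = true ∨ value.toList.all Char.isDigit = true
instance (value : String) : Decidable (Pre_get_ranged_digit value) := by unfold Pre_get_ranged_digit; infer_instance

def pvWitness_get_ranged_digit : String := "277"

def Spec_get_ranged_digit (value : String) (out : String) : Prop := out = get_ranged_digit_alt value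
instance (value : String) (out : String) : Decidable (Spec_get_ranged_digit value out) := by unfold Spec_get_ranged_digit; infer_instance

-- ===== CLAIM (what is proved, stated in full; the proofs are below) =====
def Claim_equal_get_ranged_digit : Prop := ∀ (value : String), Dom_get_ranged_digit value → Pre_get_ranged_digit value → Spec_get_ranged_digit value (get_ranged_digit value)

-- ===== LEMMAS AND PROOFS =====
-- B's fused accumulator loop equals A's filter-map-foldl, for any accumulator
theorem pvProd_eq (cs : List Char) (acc : Int) :
    pvProdB cs acc = ((cs.filter (fun c => c != '0')).map pvDigitA).foldl (fun a b => a * b) acc := by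
  induction cs generalizing acc with
  | nil => simp [pvProdB]
  | cons c t ih =>
    by_cases h : c != '0' <;> simp [pvProdB, h, ih, pvDigitA]

theorem pvLoop_eq (p : Int) : pvLoopA p = pvRecB p := by
  rw [pvLoopA, pvRecB]
  simp only [← pvProd_eq]
  split
  · rfl
  · split
    · exact pvLoop_eq _
    · rfl
termination_by p.toNat
decreasing_by rename_i h2; simpa using h2

-- ===== VERDICT (by name: the statement is the Claim_ definition above) =====
theorem get_ranged_digit_spec : Claim_equal_get_ranged_digit := by
  intro value _ _
  unfold Spec_get_ranged_digit get_ranged_digit get_ranged_digit_alt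
  simp only [← pvProd_eq, pvLoop_eq]
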